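-- pv_equiv track=rewrite | github.com/Andreea101018/gdpr-compliant-prompt-sanitizer | bert/transformer_sanitizer.py | looks_like_password
-- ===== SOURCE A (Python) =====
-- def looks_like_password(token):
--     if len(token) < 8:
--         return False
--
--     has_upper = any(c.isupper() for c in token)
--     has_lower = any(c.islower() for c in token)
--     has_digit = any(c.isdigit() for c in token)
--     has_symbol = any(not c.isalnum() for c in token)
--
--     score = has_upper + has_lower + has_digit + has_symbol
--     return score >= 3
-- ===== SOURCE B (Python) =====
-- def _char_class(c):
--     """Map a character to its (single) category label, or None if uncategorized."""
--     if c.isupper():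
--         return 'U'
--     if c.islower():
--         return 'L'
--     if c.isdigit():
--         return 'D'
--     if not c.isalnum():
--         return 'S'
--     return None
--
-- def looks_like_password(token):
--     if len(token) < 8:
--         return False
--     cats = {_char_class(c) for c in token}
--     cats.discard(None)
--     return len(cats) >= 3
-- ===== Notes on version B (the rewrite author's own statement) =====
-- stated objective: alternative
-- what changed: Replaces A's four boolean any() scans and score sum with a partition-based approach: each character is mapped by a classifier to a single category label, the distinct labels are collected into a set, and the set's cardinality is compared to 3.
import Mathlib
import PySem

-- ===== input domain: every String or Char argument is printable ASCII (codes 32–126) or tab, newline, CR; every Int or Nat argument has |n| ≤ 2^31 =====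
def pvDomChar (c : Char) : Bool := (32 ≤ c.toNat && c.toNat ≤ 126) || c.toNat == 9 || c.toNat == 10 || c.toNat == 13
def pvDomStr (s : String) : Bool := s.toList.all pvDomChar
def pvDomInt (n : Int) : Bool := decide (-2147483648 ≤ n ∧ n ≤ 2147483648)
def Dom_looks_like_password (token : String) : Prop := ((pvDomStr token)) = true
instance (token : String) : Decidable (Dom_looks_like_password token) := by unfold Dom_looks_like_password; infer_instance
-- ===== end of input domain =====

-- B partitions each character into one category label via a classifier and compares the
-- cardinality of the resulting label set to 3, instead of A's four any() scans and score sum.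

-- ===== PORT A =====
def looks_like_password (token : String) : Bool :=
  if token.toList.length < 8 then false
  else
    let has_upper := token.toList.any (fun c => PySem.Chars.isupper c)
    let has_lower := token.toList.any (fun c => PySem.Chars.islower c)
    let has_digit := token.toList.any (fun c => PySem.Chars.isdigit c)
    let has_symbol := token.toList.any (fun c => !PySem.Chars.isalnum c)
    let score : Nat := (if has_upper then 1 else 0) + (if has_lower then 1 else 0)
      + (if has_digit then 1 else 0) + (if has_symbol then 1 else 0)
    decide (score ≥ 3)

-- ===== PORT B =====
-- classifier: each character gets a single category label, or none if uncategorized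
def charClass (c : Char) : Option String :=
  if PySem.Chars.isupper c then some "U"
  else if PySem.Chars.islower c then some "L"
  else if PySem.Chars.isdigit c then some "D"
  else if !PySem.Chars.isalnum c then some "S"
  else none

def looks_like_password_alt (token : String) : Bool :=
  if token.toList.length < 8 then false
  else
    -- {_char_class(c) for c in token} — a set comprehension = set of the mapped labels
    let cats : PySem.Set (Option String) := PySem.Set.ofList (token.toList.map charClass)
    let cats := PySem.Set.discard cats none
    decide (PySem.Set.len cats ≥ 3)

-- ===== PRECONDITION & SPEC =====
def Spec_looks_like_password (token : String) (out : Bool) : Prop := out = looks_like_password_alt token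
instance (token : String) (out : Bool) : Decidable (Spec_looks_like_password token out) := by unfold Spec_looks_like_password; infer_instance

-- ===== CLAIM =====
def Claim_equal_looks_like_password : Prop := ∀ (token : String), Dom_looks_like_password token → Spec_looks_like_password token (looks_like_password token)

-- ===== LEMMAS AND PROOFS =====

-- a letter/digit character belongs to exactly one of the three ranges
theorem isupper_false_of_islower (c : Char) (h : PySem.Chars.islower c = true) :
    PySem.Chars.isupper c = false := by
  simp only [PySem.Chars.islower, Bool.and_eq_true, decide_eq_true_eq] at h
  simp only [PySem.Chars.isupper, Bool.and_eq_false_iff, decide_eq_false_iff_not]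
  right; intro hZ; exact absurd (h.1.trans hZ) (by decide)

theorem isupper_false_of_isdigit (c : Char) (h : PySem.Chars.isdigit c = true) :
    PySem.Chars.isupper c = false := by
  simp only [PySem.Chars.isdigit, Bool.and_eq_true, decide_eq_true_eq] at h
  simp only [PySem.Chars.isupper, Bool.and_eq_false_iff, decide_eq_false_iff_not]
  left; intro hA; exact absurd (hA.trans h.2) (by decide)

theorem islower_false_of_isdigit (c : Char) (h : PySem.Chars.isdigit c = true) :
    PySem.Chars.islower c = false := by
  simp only [PySem.Chars.isdigit, Bool.and_eq_true, decide_eq_true_eq] at h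
  simp only [PySem.Chars.islower, Bool.and_eq_false_iff, decide_eq_false_iff_not]
  left; intro ha; exact absurd (ha.trans h.2) (by decide)

-- the classifier returns exactly the label of the class the corresponding any() scan tests for
theorem charClass_U (c : Char) : charClass c = some "U" ↔ PySem.Chars.isupper c = true := by
  constructor
  · intro h; unfold charClass at h; split_ifs at h <;> simp_all
  · intro h; unfold charClass; simp [h]

theorem charClass_L (c : Char) : charClass c = some "L" ↔ PySem.Chars.islower c = true := by
  constructor
  · intro h; unfold charClass at h; split_ifs at h <;> simp_all
  · intro h; unfold charClass; simp [h, isupper_false_of_islower c h]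

theorem charClass_D (c : Char) : charClass c = some "D" ↔ PySem.Chars.isdigit c = true := by
  constructor
  · intro h; unfold charClass at h; split_ifs at h <;> simp_all
  · intro h
    unfold charClass
    simp [h, isupper_false_of_isdigit c h, islower_false_of_isdigit c h]

theorem charClass_S (c : Char) : charClass c = some "S" ↔ PySem.Chars.isalnum c = false := by
  constructor
  · intro h
    unfold charClass at h
    split_ifs at h with h1 h2 h3 h4
    · exact absurd h (by simp)
    · exact absurd h (by simp)
    · exact absurd h (by simp)
    · simpa using h4
  · intro h
    have h' := h
    simp only [PySem.Chars.isalnum, PySem.Chars.isalpha, Bool.or_eq_false_iff] at h'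
    unfold charClass
    rw [if_neg (by simp [h'.1.1]), if_neg (by simp [h'.1.2]), if_neg (by simp [h'.2]),
      if_pos (by simp [h])]

theorem charClass_ne_none (c : Char) : charClass c ≠ none := by
  unfold charClass
  split_ifs with h1 h2 h3 h4 <;> simp_all
  simp [PySem.Chars.isalnum, PySem.Chars.isalpha, h1, h2, h3] at h4

-- a nodup list of labels drawn from the four categories has length = sum of membership indicators
theorem len_labels (S : List (Option String))
    (hsub : ∀ x ∈ S, x = some "U" ∨ x = some "L" ∨ x = some "D" ∨ x = some "S")
    (hnd : S.Nodup) :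
    S.length = (if some "U" ∈ S then 1 else 0) + (if some "L" ∈ S then 1 else 0)
      + (if some "D" ∈ S then 1 else 0) + (if some "S" ∈ S then 1 else 0) := by
  induction S with
  | nil => simp
  | cons x S ih =>
    have hx := hsub x (by simp)
    have hxS : x ∉ S := (List.nodup_cons.mp hnd).1
    have ih' := ih (fun y hy => hsub y (by simp [hy])) hnd.of_cons
    rcases hx with h | h | h | h <;> subst h <;>
      simp [List.mem_cons, hxS, ih'] <;> omega

-- label membership in the mapped list = the corresponding any() scan
theorem mem_map_iff_any (cs : List Char) (l : Option String) (p : Char → Bool)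
    (h : ∀ c, charClass c = l ↔ p c = true) :
    (l ∈ cs.map charClass) ↔ cs.any p = true := by
  simp only [List.mem_map, List.any_eq_true]
  constructor
  · rintro ⟨c, hc, hl⟩; exact ⟨c, hc, (h c).mp hl⟩
  · rintro ⟨c, hc, hp⟩; exact ⟨c, hc, (h c).mpr hp⟩

theorem looks_like_password_eq (token : String) :
    looks_like_password token = looks_like_password_alt token := by
  unfold looks_like_password looks_like_password_alt
  by_cases hlen : token.toList.length < 8
  · rw [if_pos hlen, if_pos hlen]
  · rw [if_neg hlen, if_neg hlen]
    set cs := token.toList with hcs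
    set S0 : PySem.Set (Option String) := PySem.Set.ofList (cs.map charClass) with hS0
    have hnone : (none : Option String) ∉ S0 := by
      rw [hS0, PySem.Set.mem_ofList]
      intro hmem0
      rcases List.mem_map.mp hmem0 with ⟨c, -, hc⟩
      exact charClass_ne_none c hc
    have hdisc : PySem.Set.discard S0 none = S0 := by
      simp only [PySem.Set.discard]
      apply List.filter_eq_self.mpr
      intro x hx
      have hxn : x ≠ none := fun h => hnone (h ▸ hx)
      simp [Option.isSome_iff_ne_none, hxn]
    simp only [hdisc, PySem.Set.len]
    have hsub : ∀ x ∈ S0, x = some "U" ∨ x = some "L" ∨ x = some "D" ∨ x = some "S" := by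
      intro x hx
      rw [hS0, PySem.Set.mem_ofList] at hx
      rcases List.mem_map.mp hx with ⟨c, _, hc⟩
      subst hc
      unfold charClass
      split_ifs with h1 h2 h3 h4 <;> simp_all
      simp [PySem.Chars.isalnum, PySem.Chars.isalpha, h1, h2, h3] at h4
    have hmem : ∀ l : Option String, (l ∈ S0) ↔ l ∈ cs.map charClass := by
      intro l; rw [hS0, PySem.Set.mem_ofList]
    have hlenS := len_labels S0 hsub (hS0 ▸ PySem.Set.nodup_ofList (cs.map charClass))
    have hU : (some "U" ∈ S0) ↔ cs.any (fun c => PySem.Chars.isupper c) = true := by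
      rw [hmem, mem_map_iff_any cs _ _ charClass_U]
    have hL : (some "L" ∈ S0) ↔ cs.any (fun c => PySem.Chars.islower c) = true := by
      rw [hmem, mem_map_iff_any cs _ _ charClass_L]
    have hD : (some "D" ∈ S0) ↔ cs.any (fun c => PySem.Chars.isdigit c) = true := by
      rw [hmem, mem_map_iff_any cs _ _ charClass_D]
    have hS : (some "S" ∈ S0) ↔ cs.any (fun c => !PySem.Chars.isalnum c) = true := by
      rw [hmem, mem_map_iff_any cs _ _ (fun c => by rw [charClass_S c, Bool.not_eq_true'])]
    rw [hlenS]
    simp only [hU, hL, hD, hS]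
    norm_cast

-- ===== VERDICT =====
theorem looks_like_password_spec : Claim_equal_looks_like_password := by
  intro token _
  exact looks_like_password_eq token
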